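-- pv_equiv track=rewrite | github.com/imsure/tech-interview-prep | py/misc/longest_substr.py | longest_substr
-- ===== SOURCE A (Python) =====
-- def longest_substr(A, B):
--     """
--     Define dp[i][j] as: whether substr B[0...j] and substr A[i-j, j] match or not, where i >= j
--
--     dp[i][j] = True if A[i] == B[j] and dp[i-1][j-1] is True and i >= j > 0
--              = False if A[i] != B[j]
--
--     :param A:
--     :param B:
--     :return:
--     """
--     n, m = len(A), len(B)
--
--     dp = []
--     for i in range(n):
--         dp.append([])
--         for j in range(m):
--             dp[i].append(False)
--
--     max_j = 0
--     for i in range(n):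
--         for j in range(m):
--             if i >= j and A[i] == B[j]:
--                 if j == 0:
--                     dp[i][j] = True
--                 elif dp[i-1][j-1]:
--                     dp[i][j] = True
--                     max_j = max(max_j, j)
--
--     ans = []
--     for i in range(n):
--         if i >= max_j and dp[i][max_j]:
--             ans.append((i-max_j, max_j + 1))
--
--     return ans
-- ===== SOURCE B (Python) =====
-- def _lcp(s, t):
--     """Length of the longest common prefix of s and t."""
--     k = 0
--     while k < len(s) and k < len(t) and s[k] == t[k]:
--         k += 1
--     return k
--
--
-- def longest_substr(A, B):
--     n = len(A)
--     lcps = [_lcp(A[p:], B) for p in range(n)]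
--     L = max(lcps, default=0)
--     if L == 0:
--         return []
--     return [(p, L) for p in range(n) if lcps[p] >= L]
-- ===== Notes on version B (the rewrite author's own statement) =====
-- stated objective: simpler
-- what changed: Replaced the O(n*m) boolean DP table plus max_j bookkeeping by a direct per-start longest-common-prefix scan (stops at the first mismatch): compute lcp(A[p:], B) for each start p, take the maximum L, and list all starts attaining it.
import Mathlib
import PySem

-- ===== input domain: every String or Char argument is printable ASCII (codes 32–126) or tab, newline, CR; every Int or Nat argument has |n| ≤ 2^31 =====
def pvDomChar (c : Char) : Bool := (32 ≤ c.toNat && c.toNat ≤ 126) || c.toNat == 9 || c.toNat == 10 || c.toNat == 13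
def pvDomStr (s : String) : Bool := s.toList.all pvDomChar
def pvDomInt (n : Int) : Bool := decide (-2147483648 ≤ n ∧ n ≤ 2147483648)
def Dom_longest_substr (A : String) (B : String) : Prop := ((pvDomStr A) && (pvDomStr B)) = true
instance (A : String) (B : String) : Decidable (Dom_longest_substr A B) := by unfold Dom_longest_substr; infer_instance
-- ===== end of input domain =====

-- B replaces A's boolean DP table and max_j bookkeeping by a direct per-start
-- longest-common-prefix scan that stops at the first mismatch (simpler; measured faster
-- by a constant factor).

-- ===== PORT A =====
-- one inner-loop step of A's DP: 'if i >= j and A[i] == B[j]: ...'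
def pvStepA (a b : List Char) (s : List (List Bool) × Nat) (i j : Nat) : List (List Bool) × Nat :=
  if j ≤ i ∧ a.getD i ' ' = b.getD j ' ' then
    if j = 0 then (s.1.set i ((s.1.getD i []).set j true), s.2)
    else if (s.1.getD (i - 1) []).getD (j - 1) false then
      (s.1.set i ((s.1.getD i []).set j true), max s.2 j)
    else s
  else s

def longest_substr (A : String) (B : String) : List (Int × Int) :=
  let a := A.toList
  let b := B.toList
  let n := a.length
  let m := b.length
  -- dp built by the two append loops
  let dp0 := (List.range n).foldl
    (fun dp _ => dp ++ [(List.range m).foldl (fun row _ => row ++ [false]) []]) []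
  -- the double loop updating dp and max_j
  let st := (List.range n).foldl
    (fun s i => (List.range m).foldl (fun s j => pvStepA a b s i j) s) (dp0, 0)
  -- the answer-collecting loop; Python reads dp[i][max_j] (in range under Pre_)
  (List.range n).foldl
    (fun ans i =>
      if st.2 ≤ i ∧ (st.1.getD i []).getD st.2 false = true then
        ans ++ [((i : Int) - (st.2 : Int), (st.2 : Int) + 1)]
      else ans) []

-- ===== PORT B =====
-- _lcp(s, t): length of the longest common prefix (the while loop, as structural recursion)
def pvLcp (s t : List Char) : Nat :=
  match s, t with
  | x :: s', y :: t' => if x = y then pvLcp s' t' + 1 else 0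
  | _, _ => 0

def longest_substr_alt (A : String) (B : String) : List (Int × Int) :=
  let a := A.toList
  let b := B.toList
  let n := a.length
  let lcps := (List.range n).map (fun p => pvLcp (a.drop p) b)
  let L := lcps.foldl max 0
  if L = 0 then []
  else ((List.range n).filter (fun p => L ≤ lcps.getD p 0)).map
    (fun (p : Nat) => ((p : Int), (L : Int)))

-- ===== PRECONDITION & SPEC =====
-- Pre_ excludes exactly the inputs where A raises: B = "" with A ≠ "" (dp rows are
-- empty, yet Python reads dp[i][0] → IndexError).
def Pre_longest_substr (A : String) (B : String) : Prop := B ≠ "" ∨ A = ""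
instance (A : String) (B : String) : Decidable (Pre_longest_substr A B) := by
  unfold Pre_longest_substr; infer_instance
def pvWitness_longest_substr : String × String := ("abcab", "abx")

def Spec_longest_substr (A : String) (B : String) (out : List (Int × Int)) : Prop :=
  out = longest_substr_alt A B
instance (A : String) (B : String) (out : List (Int × Int)) :
    Decidable (Spec_longest_substr A B out) := by unfold Spec_longest_substr; infer_instance

-- ===== CLAIM (what is proved, stated in full; the proofs are below) =====
def Claim_equal_longest_substr : Prop := ∀ (A : String) (B : String),
  Dom_longest_substr A B → Pre_longest_substr A B →
    Spec_longest_substr A B (longest_substr A B)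

-- ===== LEMMAS AND PROOFS =====

-- abbreviations used only by the proofs
def pvG (a b : List Char) (p : Nat) : Nat := pvLcp (a.drop p) b
-- specification of A's dp cell (i, j): the j+1 chars of B ending at position i of A match
def pvF (a b : List Char) (i j : Nat) : Bool := decide (j ≤ i ∧ j + 1 ≤ pvG a b (i - j))
-- row i of the dp table with the first j cells filled in
def pvRow (a b : List Char) (m i j : Nat) : List Bool :=
  (List.range m).map (fun c => if c < j then pvF a b i c else false)
-- the dp table after fully processing rows < r and the first j cells of row r
def pvDP (a b : List Char) (n m r j : Nat) : List (List Bool) :=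
  (List.range n).map (fun x =>
    if x < r then pvRow a b m x m
    else if x = r then pvRow a b m r j
    else List.replicate m false)

theorem pvLcp_le_left : ∀ (s t : List Char), pvLcp s t ≤ s.length
  | [], _ => by simp [pvLcp]
  | _ :: _, [] => by simp [pvLcp]
  | x :: s', y :: t' => by
    by_cases h : x = y
    · have := pvLcp_le_left s' t'
      simp [pvLcp, h]; omega
    · simp [pvLcp, h]

theorem pvLcp_le_right : ∀ (s t : List Char), pvLcp s t ≤ t.length
  | [], _ => by simp [pvLcp]
  | _ :: _, [] => by simp [pvLcp]
  | x :: s', y :: t' => by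
    by_cases h : x = y
    · have := pvLcp_le_right s' t'
      simp [pvLcp, h]; omega
    · simp [pvLcp, h]

theorem pvLcp_succ_iff : ∀ (s t : List Char) (k : Nat) (d : Char),
    k + 1 ≤ pvLcp s t ↔
      k ≤ pvLcp s t ∧ k < s.length ∧ k < t.length ∧ s.getD k d = t.getD k d
  | [], t, k, d => by simp [pvLcp]
  | _ :: _, [], k, d => by simp [pvLcp]
  | x :: s', y :: t', 0, d => by by_cases h : x = y <;> simp [pvLcp, h]
  | x :: s', y :: t', k + 1, d => by
    by_cases h : x = y
    · have ih := pvLcp_succ_iff s' t' k d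
      simp only [pvLcp, if_pos h, List.length_cons, List.getD_cons_succ,
        Nat.add_le_add_iff_right, Nat.add_lt_add_iff_right]
      exact ih
    · simp [pvLcp, h]

theorem pvGetD_drop (l : List Char) (i j : Nat) (d : Char) :
    (l.drop i).getD j d = l.getD (i + j) d := by
  simp [List.getD, List.getElem?_drop]

theorem pvF_false_of_lt (a b : List Char) (r j : Nat) (h : r < j) :
    pvF a b r j = false := by
  simp only [pvF, decide_eq_false_iff_not]
  intro hc; omega

theorem pvF_head (a b : List Char) (r j : Nat) (hjr : j ≤ r)
    (hf : pvF a b r j = true) :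
    a.getD r ' ' = b.getD j ' ' ∧ r < a.length ∧ j < b.length := by
  simp only [pvF, decide_eq_true_eq] at hf
  have h2 := (pvLcp_succ_iff (a.drop (r - j)) b j ' ').mp hf.2
  rw [pvGetD_drop] at h2
  have he : r - j + j = r := by omega
  rw [he] at h2
  have hlen : (a.drop (r - j)).length = a.length - (r - j) := by simp
  refine ⟨h2.2.2.2, by omega, h2.2.2.1⟩

theorem pvF_zero_iff (a b : List Char) (r : Nat) (hr : r < a.length)
    (hm : 0 < b.length) :
    pvF a b r 0 = true ↔ a.getD r ' ' = b.getD 0 ' ' := by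
  simp only [pvF, pvG, decide_eq_true_eq, Nat.sub_zero, Nat.zero_le, true_and]
  rw [pvLcp_succ_iff (a.drop r) b 0 ' ', pvGetD_drop]
  have hlen : (a.drop r).length = a.length - r := by simp
  constructor
  · intro h; exact h.2.2.2
  · intro h; exact ⟨Nat.zero_le _, by omega, hm, by simpa using h⟩

theorem pvF_succ_iff (a b : List Char) (r j : Nat) (hr : r < a.length)
    (hj : j < b.length) (h1 : 1 ≤ j) (hjr : j ≤ r) :
    pvF a b r j = true ↔
      (a.getD r ' ' = b.getD j ' ' ∧ pvF a b (r - 1) (j - 1) = true) := by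
  simp only [pvF, pvG, decide_eq_true_eq]
  have he1 : r - 1 - (j - 1) = r - j := by omega
  have he2 : r - j + j = r := by omega
  have he3 : j - 1 + 1 = j := by omega
  rw [he1]
  rw [pvLcp_succ_iff (a.drop (r - j)) b j ' ', pvGetD_drop, he2]
  have hlen : (a.drop (r - j)).length = a.length - (r - j) := by simp
  constructor
  · rintro ⟨-, hle, -, -, hc⟩
    exact ⟨hc, ⟨by omega, by omega⟩⟩
  · rintro ⟨hc, -, hle⟩
    rw [he3] at hle
    exact ⟨hjr, hle, by omega, hj, hc⟩

theorem pvGetD_map_range {α : Type} (f : Nat → α) (n k : Nat) (d : α) :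
    ((List.range n).map f).getD k d = if k < n then f k else d := by
  by_cases h : k < n
  · rw [if_pos h]; exact PySem.List.getD_map_range f n k d h
  · rw [if_neg h]
    apply List.getD_eq_default
    simp; omega

theorem pvSet_map_range {α : Type} (f : Nat → α) (n k : Nat) (v : α) :
    ((List.range n).map f).set k v
      = (List.range n).map (fun x => if x = k then v else f x) := by
  apply List.ext_getElem
  · simp
  · intro i h1 h2
    simp only [List.getElem_set, List.getElem_map, List.getElem_range]
    by_cases h : k = i
    · subst h; simp
    · rw [if_neg h, if_neg (fun hik => h hik.symm)]

theorem pvRow_zero (a b : List Char) (m i : Nat) :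
    pvRow a b m i 0 = List.replicate m false := by
  simp [pvRow, List.map_const']

theorem pvRow_succ_false (a b : List Char) (m r j : Nat)
    (h : pvF a b r j = false) : pvRow a b m r (j + 1) = pvRow a b m r j := by
  unfold pvRow
  apply List.map_congr_left
  intro c _
  by_cases hc : c < j
  · rw [if_pos (by omega), if_pos hc]
  · by_cases hcj : c = j
    · subst hcj; rw [if_pos (by omega), if_neg hc, h]
    · rw [if_neg (by omega), if_neg hc]

theorem pvRow_succ_true (a b : List Char) (m r j : Nat)
    (h : pvF a b r j = true) :
    (pvRow a b m r j).set j true = pvRow a b m r (j + 1) := by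
  unfold pvRow
  rw [pvSet_map_range]
  apply List.map_congr_left
  intro c _
  by_cases hcj : c = j
  · subst hcj; rw [if_pos rfl, if_pos (by omega), h]
  · rw [if_neg hcj]
    by_cases hc : c < j
    · rw [if_pos hc, if_pos (by omega)]
    · rw [if_neg hc, if_neg (by omega)]

theorem pvDP_zero (a b : List Char) (n m : Nat) :
    pvDP a b n m 0 0 = List.replicate n (List.replicate m false) := by
  unfold pvDP
  have : ∀ x ∈ List.range n,
      (if x < 0 then pvRow a b m x m
       else if x = 0 then pvRow a b m 0 0 else List.replicate m false)
        = List.replicate m false := by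
    intro x _
    rw [if_neg (by omega)]
    by_cases h : x = 0
    · rw [if_pos h, pvRow_zero]
    · rw [if_neg h]
  rw [List.map_congr_left this, List.map_const']
  simp

theorem pvDP_row_end (a b : List Char) (n m r : Nat) :
    pvDP a b n m r m = pvDP a b n m (r + 1) 0 := by
  unfold pvDP
  apply List.map_congr_left
  intro x _
  by_cases h1 : x < r
  · rw [if_pos h1, if_pos (by omega)]
  · by_cases h2 : x = r
    · subst h2; rw [if_neg h1, if_pos rfl, if_pos (by omega)]
    · rw [if_neg h1, if_neg h2, if_neg (by omega)]
      by_cases h3 : x = r + 1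
      · rw [if_pos h3, pvRow_zero]
      · rw [if_neg h3]

theorem pvDP_getD_cur (a b : List Char) (r j : Nat) (hr : r < a.length) :
    (pvDP a b a.length b.length r j).getD r [] = pvRow a b b.length r j := by
  unfold pvDP
  rw [pvGetD_map_range, if_pos hr, if_neg (by omega), if_pos rfl]

theorem pvDP_getD_prev (a b : List Char) (r j : Nat) (hr : r < a.length)
    (h1 : 1 ≤ r) :
    (pvDP a b a.length b.length r j).getD (r - 1) [] = pvRow a b b.length (r - 1) b.length := by
  unfold pvDP
  rw [pvGetD_map_range, if_pos (by omega), if_pos (by omega)]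

theorem pvRow_getD_full (a b : List Char) (i c : Nat) (hc : c < b.length) :
    (pvRow a b b.length i b.length).getD c false = pvF a b i c := by
  unfold pvRow
  rw [pvGetD_map_range, if_pos hc, if_pos hc]

theorem pvDP_set (a b : List Char) (r j j' : Nat) (hr : r < a.length) :
    (pvDP a b a.length b.length r j).set r (pvRow a b b.length r j')
      = pvDP a b a.length b.length r j' := by
  unfold pvDP
  rw [pvSet_map_range]
  apply List.map_congr_left
  intro x _
  by_cases hx : x = r
  · subst hx; rw [if_pos rfl, if_neg (by omega), if_pos rfl]
  · rw [if_neg hx]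
    by_cases hlt : x < r <;> simp [hlt, hx]

theorem pvDP_succ_false (a b : List Char) (r j : Nat)
    (hf : pvF a b r j = false) :
    pvDP a b a.length b.length r (j + 1) = pvDP a b a.length b.length r j := by
  unfold pvDP
  apply List.map_congr_left
  intro x _
  by_cases h1 : x < r
  · simp [h1]
  · by_cases h2 : x = r
    · subst h2
      rw [if_neg h1, if_neg h1, if_pos rfl, if_pos rfl,
        pvRow_succ_false a b b.length x j hf]
    · simp [h1, h2]

theorem pvStepA_eq (a b : List Char) (r j acc : Nat) (hr : r < a.length)
    (hj : j < b.length) :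
    pvStepA a b (pvDP a b a.length b.length r j, acc) r j =
      (pvDP a b a.length b.length r (j + 1),
       if 1 ≤ j ∧ pvF a b r j = true then max acc j else acc) := by
  unfold pvStepA
  by_cases hjr : j ≤ r
  · by_cases hc : a.getD r ' ' = b.getD j ' '
    · rw [if_pos ⟨hjr, hc⟩]
      by_cases hj0 : j = 0
      · subst hj0
        have hf : pvF a b r 0 = true := (pvF_zero_iff a b r hr hj).mpr hc
        rw [if_pos rfl]
        show (_, acc) = _
        rw [pvDP_getD_cur a b r 0 hr, pvRow_succ_true a b b.length r 0 hf,
          pvDP_set a b r 0 (0 + 1) hr]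
        simp
      · have h1 : 1 ≤ j := by omega
        rw [if_neg hj0]
        rw [show ((pvDP a b a.length b.length r j, acc) :
              List (List Bool) × Nat).1 = pvDP a b a.length b.length r j from rfl]
        rw [pvDP_getD_prev a b r j hr (by omega),
          pvRow_getD_full a b (r - 1) (j - 1) (by omega)]
        by_cases hfp : pvF a b (r - 1) (j - 1) = true
        · have hf : pvF a b r j = true :=
            (pvF_succ_iff a b r j hr hj h1 hjr).mpr ⟨hc, hfp⟩
          rw [if_pos hfp]
          show (_, _) = _
          rw [pvDP_getD_cur a b r j hr, pvRow_succ_true a b b.length r j hf,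
            pvDP_set a b r j (j + 1) hr, if_pos ⟨h1, hf⟩]
        · have hf : pvF a b r j = false := by
            by_contra hcon
            have hft : pvF a b r j = true := by
              revert hcon; cases pvF a b r j <;> simp
            exact hfp ((pvF_succ_iff a b r j hr hj h1 hjr).mp hft).2
          rw [if_neg hfp, pvDP_succ_false a b r j hf]
          simp [hf]
    · have hf : pvF a b r j = false := by
        by_contra hcon
        have hft : pvF a b r j = true := by
          revert hcon; cases pvF a b r j <;> simp
        exact hc (pvF_head a b r j hjr hft).1
      rw [if_neg (by intro hx; exact hc hx.2), pvDP_succ_false a b r j hf]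
      simp [hf]
  · have hf : pvF a b r j = false := pvF_false_of_lt a b r j (by omega)
    rw [if_neg (by intro hx; exact hjr hx.1), pvDP_succ_false a b r j hf]
    simp [hf]

-- running value of max_j over the first j cells of row r
def pvAccRow (a b : List Char) (r j acc : Nat) : Nat :=
  (List.range j).foldl
    (fun a2 j' => if 1 ≤ j' ∧ pvF a b r j' = true then max a2 j' else a2) acc

-- value of max_j after processing the first r rows
def pvMJpart (a b : List Char) (r : Nat) : Nat :=
  (List.range r).foldl (fun acc x => pvAccRow a b x b.length acc) 0

theorem pvInnerFold (a b : List Char) (r acc : Nat) (hr : r < a.length) :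
    ∀ j, j ≤ b.length →
    (List.range j).foldl (fun s j' => pvStepA a b s r j')
        (pvDP a b a.length b.length r 0, acc)
      = (pvDP a b a.length b.length r j, pvAccRow a b r j acc) := by
  intro j
  induction j with
  | zero => intro _; simp [pvAccRow]
  | succ j ih =>
    intro h
    rw [List.range_succ, List.foldl_append, ih (by omega), List.foldl_cons,
      List.foldl_nil, pvStepA_eq a b r j (pvAccRow a b r j acc) hr (by omega)]
    unfold pvAccRow
    rw [List.range_succ, List.foldl_append, List.foldl_cons, List.foldl_nil]

theorem pvOuterFold (a b : List Char) :
    ∀ r, r ≤ a.length →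
    (List.range r).foldl
        (fun s i => (List.range b.length).foldl (fun s j => pvStepA a b s i j) s)
        (pvDP a b a.length b.length 0 0, 0)
      = (pvDP a b a.length b.length r 0, pvMJpart a b r) := by
  intro r
  induction r with
  | zero => intro _; simp [pvMJpart]
  | succ r ih =>
    intro h
    rw [List.range_succ, List.foldl_append, ih (by omega), List.foldl_cons,
      List.foldl_nil,
      pvInnerFold a b r (pvMJpart a b r) (by omega) b.length (le_refl _),
      pvDP_row_end]
    unfold pvMJpart
    rw [List.range_succ, List.foldl_append, List.foldl_cons, List.foldl_nil]

-- max-fold helpers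
theorem pvFoldlMaxLe (l : List Nat) :
    ∀ (acc K : Nat), acc ≤ K → (∀ x ∈ l, x ≤ K) → l.foldl max acc ≤ K := by
  induction l with
  | nil => intro acc K h _; simpa using h
  | cons y l ih =>
    intro acc K h hall
    rw [List.foldl_cons]
    exact ih _ K (by have := hall y (by simp); omega)
      (fun x hx => hall x (by simp [hx]))

-- the set of (row, column) contributions to max_j, flattened
def pvS (a b : List Char) : List Nat :=
  (List.range a.length).flatMap
    (fun x => (List.range b.length).filter
      (fun j => decide (1 ≤ j ∧ pvF a b x j = true)))

theorem pvMJ_eq_foldS (a b : List Char) :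
    pvMJpart a b a.length = (pvS a b).foldl max 0 := by
  unfold pvMJpart pvS
  rw [List.foldl_flatMap]
  have hfun : (fun (acc : Nat) x => pvAccRow a b x b.length acc)
      = (fun acc x => ((List.range b.length).filter
          (fun j => decide (1 ≤ j ∧ pvF a b x j = true))).foldl max acc) := by
    funext acc x
    unfold pvAccRow
    rw [PySem.List.foldl_ite_eq_foldl_filter]
  rw [hfun]

theorem pvMem_S (a b : List Char) (j : Nat) :
    j ∈ pvS a b ↔ ∃ x, x < a.length ∧ j < b.length ∧ 1 ≤ j ∧ pvF a b x j = true := by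
  unfold pvS
  simp only [List.mem_flatMap, List.mem_filter, List.mem_range,
    decide_eq_true_eq]

-- the maximum lcp value computed by B
def pvL (a b : List Char) : Nat :=
  ((List.range a.length).map (fun p => pvLcp (a.drop p) b)).foldl max 0

theorem pvG_le_L (a b : List Char) (p : Nat) (hp : p < a.length) :
    pvG a b p ≤ pvL a b := by
  exact (PySem.List.le_foldl_max _ 0).2 _ (by
    simp only [List.mem_map, List.mem_range]
    exact ⟨p, hp, rfl⟩)

theorem pvL_attained (a b : List Char) (h : pvL a b ≠ 0) :
    ∃ p, p < a.length ∧ pvG a b p = pvL a b := by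
  rcases PySem.List.foldl_max_mem
      ((List.range a.length).map (fun p => pvLcp (a.drop p) b)) 0 with h0 | hmem
  · exact absurd h0 h
  · rcases List.mem_map.mp hmem with ⟨p, hp, he⟩
    exact ⟨p, List.mem_range.mp hp, he⟩

theorem pvMJ_eq (a b : List Char) :
    pvMJpart a b a.length = pvL a b - 1 := by
  rw [pvMJ_eq_foldS]
  apply Nat.le_antisymm
  · apply pvFoldlMaxLe
    · omega
    · intro j hj
      rcases (pvMem_S a b j).mp hj with ⟨x, hx, hjb, h1, hf⟩
      simp only [pvF, decide_eq_true_eq] at hf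
      have hle : pvG a b (x - j) ≤ pvL a b := pvG_le_L a b (x - j) (by omega)
      omega
  · by_cases hL : pvL a b ≤ 1
    · omega
    · rcases pvL_attained a b (by omega) with ⟨p, hp, hgp⟩
      have hglen : pvG a b p ≤ a.length - p := by
        have := pvLcp_le_left (a.drop p) b
        simpa [pvG] using this
      have hgm : pvG a b p ≤ b.length := pvLcp_le_right _ _
      have hmem : pvL a b - 1 ∈ pvS a b := by
        rw [pvMem_S]
        refine ⟨p + (pvL a b - 1), by omega, by omega, by omega, ?_⟩
        simp only [pvF, decide_eq_true_eq]
        constructor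
        · omega
        · have he : p + (pvL a b - 1) - (pvL a b - 1) = p := by omega
          rw [he]; omega
      exact (PySem.List.le_foldl_max (pvS a b) 0).2 _ hmem

theorem pvFoldAppendConst {α β : Type} (c : α) :
    ∀ (l : List β) (init : List α),
    l.foldl (fun acc _ => acc ++ [c]) init = init ++ List.replicate l.length c := by
  intro l
  induction l with
  | nil => intro init; simp
  | cons y l ih =>
    intro init
    rw [List.foldl_cons, ih, List.append_assoc, List.length_cons]
    simp [List.replicate_succ]

theorem pvDP_final_getD (a b : List Char) (i j : Nat) (hi : i < a.length) :
    (pvDP a b a.length b.length a.length j).getD i [] = pvRow a b b.length i b.length := by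
  unfold pvDP
  rw [pvGetD_map_range, if_pos hi, if_pos hi]

theorem pvFilterRangeHigh (n k : Nat) (q : Nat → Bool) (hk : k ≤ n)
    (h : ∀ x, k ≤ x → q x = false) :
    (List.range n).filter q = (List.range k).filter q := by
  have hsplit : List.range n = List.range k ++ (List.range (n - k)).map (k + ·) := by
    rw [← List.range_add]; congr 1; omega
  rw [hsplit, List.filter_append]
  have h2 : ((List.range (n - k)).map (k + ·)).filter q = [] := by
    apply List.filter_eq_nil_iff.mpr
    intro x hx
    rcases List.mem_map.mp hx with ⟨y, _, hy⟩
    rw [← hy]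
    simp [h (k + y) (by omega)]
  rw [h2, List.append_nil]

theorem pvFilterRangeLow (n k : Nat) (q : Nat → Bool) (hk : k ≤ n)
    (h : ∀ x, x < k → q x = false) :
    (List.range n).filter q
      = ((List.range (n - k)).filter (fun x => q (k + x))).map (k + ·) := by
  have hsplit : List.range n = List.range k ++ (List.range (n - k)).map (k + ·) := by
    rw [← List.range_add]; congr 1; omega
  rw [hsplit, List.filter_append]
  have h1 : (List.range k).filter q = [] := by
    apply List.filter_eq_nil_iff.mpr
    intro x hx
    simp [h x (List.mem_range.mp hx)]
  rw [h1, List.nil_append, List.filter_map]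
  rfl

-- ===== VERDICT (by name: the statement is the Claim_ definition above) =====
theorem longest_substr_spec : Claim_equal_longest_substr := by
  intro A B _ _
  show longest_substr A B = longest_substr_alt A B
  unfold longest_substr longest_substr_alt
  simp only []
  generalize A.toList = a
  generalize B.toList = b
  -- the dp initialisation builds the all-false table
  rw [pvFoldAppendConst false (List.range b.length) ([] : List Bool)]
  simp only [List.nil_append, List.length_range]
  rw [pvFoldAppendConst (List.replicate b.length false)
    (List.range a.length) ([] : List (List Bool))]
  simp only [List.nil_append, List.length_range]
  rw [← pvDP_zero a b a.length b.length]
  -- the double loop produces the full table and max_j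
  rw [pvOuterFold a b a.length (le_refl _)]
  -- the answer loop is a filter-map
  rw [PySem.List.foldl_append_ite]
  simp only [List.nil_append, pvMJ_eq a b]
  have hfold : List.foldl max 0
      (List.map (fun p => pvLcp (List.drop p a) b) (List.range a.length))
        = pvL a b := rfl
  rw [hfold]
  by_cases hL : pvL a b = 0
  · -- no character of B matches in A: both sides are []
    rw [if_pos hL]
    have hnil : (List.range a.length).filter
        (fun i => decide (pvL a b - 1 ≤ i ∧
          ((pvDP a b a.length b.length a.length 0).getD i []).getD
            (pvL a b - 1) false = true)) = [] := by
      apply List.filter_eq_nil_iff.mpr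
      intro i hi
      have hin : i < a.length := List.mem_range.mp hi
      simp only [decide_eq_true_eq, not_and]
      intro _
      rw [pvDP_final_getD a b i 0 hin]
      unfold pvRow
      rw [pvGetD_map_range]
      by_cases hm : pvL a b - 1 < b.length
      · rw [if_pos hm, if_pos (by omega)]
        have hg : pvG a b (i - (pvL a b - 1)) ≤ pvL a b :=
          pvG_le_L a b _ (by omega)
        simp only [pvF, decide_eq_true_eq, not_and]
        intro
        omega
      · rw [if_neg hm]
        simp
    rw [hnil, List.map_nil]
  · -- there is a match of length L ≥ 1
    rw [if_neg hL]
    have hL1 : 1 ≤ pvL a b := by omega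
    rcases pvL_attained a b hL with ⟨p0, hp0, hgp0⟩
    have hp0len : pvG a b p0 ≤ a.length - p0 := by
      have := pvLcp_le_left (a.drop p0) b
      simpa [pvG] using this
    have hLm : pvL a b ≤ b.length := by
      rw [← hgp0]; exact pvLcp_le_right _ _
    have hMJn : pvL a b - 1 < a.length := by omega
    have hMJm : pvL a b - 1 < b.length := by omega
    set MJ := pvL a b - 1 with hMJ
    set L := pvL a b with hLdef
    -- rewrite A's filter predicate to a pure condition on lcp values
    have hfiltA : (List.range a.length).filter
        (fun i => decide (MJ ≤ i ∧
          ((pvDP a b a.length b.length a.length 0).getD i []).getD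
            MJ false = true))
        = (List.range a.length).filter
            (fun i => decide (MJ ≤ i ∧ L ≤ pvG a b (i - MJ))) := by
      apply List.filter_congr
      intro i hi
      have hin : i < a.length := List.mem_range.mp hi
      rw [pvDP_final_getD a b i 0 hin, pvRow_getD_full a b i MJ hMJm]
      apply decide_eq_decide.mpr
      constructor
      · rintro ⟨h1, h2⟩
        simp only [pvF, decide_eq_true_eq] at h2
        exact ⟨h1, by omega⟩
      · rintro ⟨h1, h2⟩
        refine ⟨h1, ?_⟩
        simp only [pvF, decide_eq_true_eq]
        exact ⟨h1, by omega⟩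
    rw [hfiltA]
    -- rewrite B's filter predicate likewise
    have hfiltB : (List.range a.length).filter
        (fun p => decide (L ≤ (List.map (fun p => pvLcp (List.drop p a) b)
          (List.range a.length)).getD p 0))
        = (List.range a.length).filter (fun p => decide (L ≤ pvG a b p)) := by
      apply List.filter_congr
      intro p hp
      have hpn : p < a.length := List.mem_range.mp hp
      rw [pvGetD_map_range, if_pos hpn]
      rfl
    rw [hfiltB]
    -- shift A's filter down by MJ
    rw [pvFilterRangeLow a.length MJ _ (by omega)
      (by intro x hx; simp; omega)]
    -- shrink B's range: starts ≥ length - MJ cannot reach lcp ≥ L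
    rw [pvFilterRangeHigh a.length (a.length - MJ)
      (fun p => decide (L ≤ pvG a b p)) (by omega)
      (by
        intro x hx
        have hg : pvG a b x ≤ a.length - x := by
          have := pvLcp_le_left (a.drop x) b
          simpa [pvG] using this
        simp only [decide_eq_false_iff_not, not_le]
        omega)]
    rw [List.map_map]
    -- same index set on both sides
    have hpred : (fun x => decide (MJ ≤ MJ + x ∧ L ≤ pvG a b (MJ + x - MJ)))
        = (fun x => decide (L ≤ pvG a b x)) := by
      funext x
      apply decide_eq_decide.mpr
      have he : MJ + x - MJ = x := by omega
      rw [he]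
      constructor
      · intro h; exact h.2
      · intro h; exact ⟨by omega, h⟩
    rw [hpred]
    apply List.map_congr_left
    intro x _
    simp only [Function.comp]
    have h2 : (MJ : Int) + 1 = (L : Int) := by
      have hn : MJ + 1 = L := by omega
      exact_mod_cast hn
    rw [Prod.mk.injEq]
    constructor
    · push_cast; ring
    · exact h2
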